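-- pv_equiv track=rewrite | github.com/Minnochka/python_1 | lesson_3/python_lesson_3_6.py | str_title_f
-- ===== SOURCE A (Python) =====
-- def str_title_f(old_str):
--     new_str = []
--     for n,i in enumerate(old_str):
--         if (ord(i) >= 97 and ord(i) < 123) or ord(i) == 32:
--             if n == 0 or (ord(old_str[n - 1]) == 32 and i != 32):
--                 new_str.append(i.upper())
--             else:
--                 new_str.append(i)
--         else:
--             return "Error in string!"
--     return "".join(new_str)
-- ===== SOURCE B (Python) =====
-- def str_title_f(old_str):
--     if any(not (97 <= ord(c) < 123 or ord(c) == 32) for c in old_str):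
--         return "Error in string!"
--     return old_str.title()
-- ===== Notes on version B (the rewrite author's own statement) =====
-- stated objective: idiomatic
-- what changed: Replaces the single interleaved validate-and-capitalize loop with index lookback by a validation-only pass (any over a generator) followed by the library str.title() transformation, whose C implementation does the capitalization.
import Mathlib
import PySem

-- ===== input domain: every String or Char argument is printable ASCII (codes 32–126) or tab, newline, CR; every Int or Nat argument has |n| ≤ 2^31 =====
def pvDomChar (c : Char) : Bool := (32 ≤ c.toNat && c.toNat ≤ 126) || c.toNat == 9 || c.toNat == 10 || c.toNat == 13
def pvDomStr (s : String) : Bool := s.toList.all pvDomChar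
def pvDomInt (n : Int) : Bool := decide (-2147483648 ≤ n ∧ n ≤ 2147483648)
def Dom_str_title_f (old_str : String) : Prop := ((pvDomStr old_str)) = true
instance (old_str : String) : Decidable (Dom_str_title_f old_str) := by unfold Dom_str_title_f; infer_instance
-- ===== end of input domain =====

-- B replaces A's single interleaved validate-and-capitalize loop (with index lookback) by a
-- validation-only pass followed by the library str.title() transformation (objective: idiomatic).


-- ===== PORT A =====
-- A's loop: enumerate over the characters, early return on an invalid character;
-- `old_str[n-1]` is only read when n ≥ 1, so it is always in range and `getD` is exact there.
def str_title_f_go (full : List Char) (rest : List Char) (n : Nat) (acc : List Char) : String :=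
  match rest with
  | [] => String.mk acc                              -- "".join(new_str)
  | c :: rest' =>
    if (97 ≤ c.toNat && c.toNat < 123) || c.toNat == 32 then
      if n == 0 || (((full.getD (n - 1) ' ').toNat == 32) && !(c.toNat == 32)) then
        str_title_f_go full rest' (n + 1) (acc ++ [c.toUpper])
      else
        str_title_f_go full rest' (n + 1) (acc ++ [c])
    else "Error in string!"

def str_title_f (old_str : String) : String :=
  str_title_f_go old_str.toList old_str.toList 0 []

-- ===== PORT B =====
-- Source B's validity test: 97 <= ord(c) < 123 or ord(c) == 32
def pvValidB (c : Char) : Bool := (97 ≤ c.toNat && c.toNat < 123) || c.toNat == 32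

-- Python's str.title() ported by hand, step for step: a cased character is uppercased after a
-- non-cased position and lowercased otherwise; exact for ASCII strings (all of Dom), where the
-- cased characters are exactly A-Z and a-z.
def pvCased (c : Char) : Bool := (97 ≤ c.toNat && c.toNat < 123) || (65 ≤ c.toNat && c.toNat < 91)

def pvTitleGo : List Char → Bool → List Char
  | [], _ => []
  | c :: t, prev =>
      (if pvCased c then (if prev then c.toLower else c.toUpper) else c) :: pvTitleGo t (pvCased c)

def str_title_f_alt (old_str : String) : String :=
  if old_str.toList.any (fun c => !pvValidB c) then "Error in string!"
  else String.mk (pvTitleGo old_str.toList false)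

-- ===== PRECONDITION & SPEC =====
def Spec_str_title_f (old_str : String) (out : String) : Prop := out = str_title_f_alt old_str
instance (old_str : String) (out : String) : Decidable (Spec_str_title_f old_str out) := by unfold Spec_str_title_f; infer_instance

-- ===== CLAIM (what is proved, stated in full; the proofs are below) =====
def Claim_equal_str_title_f : Prop := ∀ (old_str : String), Dom_str_title_f old_str → Spec_str_title_f old_str (str_title_f old_str)

-- ===== LEMMAS AND PROOFS =====

-- the `prev` flag pvTitleGo carries at the position just after `pre`
def pvPrevB (pre : List Char) : Bool := (pre.getLast?).elim false pvCased

theorem pv_toLower_lower (c : Char) (h1 : 97 ≤ c.toNat) (h2 : c.toNat < 123) :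
    c.toLower = c := by
  unfold Char.toLower
  split
  · next h =>
    exfalso
    obtain ⟨_, hb⟩ := h
    have hb' : c.val.toNat ≤ ('Z').val.toNat := UInt32.le_iff_toNat_le.mp hb
    have h1' : 97 ≤ c.val.toNat := h1
    rw [show ('Z').val.toNat = 90 from rfl] at hb'
    omega
  · rfl

theorem pv_char_eq_of_toNat (c : Char) (h : c.toNat = 32) : c = ' ' := by
  apply Char.ext
  apply UInt32.toNat_inj.mp
  exact h

theorem pv_getLast_append (pre : List Char) (c : Char) :
    pvPrevB (pre ++ [c]) = pvCased c := by
  simp [pvPrevB]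

-- main invariant: past a fully valid prefix `pre`, A's loop computes what B computes on `rest`
theorem pv_go_eq (rest : List Char) : ∀ (pre acc : List Char),
    pre.all pvValidB = true →
    str_title_f_go (pre ++ rest) rest pre.length acc =
      (if rest.any (fun c => !pvValidB c) then "Error in string!"
       else String.mk (acc ++ pvTitleGo rest (pvPrevB pre))) := by
  induction rest with
  | nil => intro pre acc _; simp [str_title_f_go, pvTitleGo]
  | cons c t ih =>
    intro pre acc hpre
    by_cases hv : pvValidB c = true
    · -- valid head character
      have hval : ((97 ≤ c.toNat && c.toNat < 123) || c.toNat == 32) = true := hv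
      have hstep : ∀ d : Char,
          str_title_f_go (pre ++ c :: t) t (pre.length + 1) (acc ++ [d]) =
            (if t.any (fun x => !pvValidB x) then "Error in string!"
             else String.mk ((acc ++ [d]) ++ pvTitleGo t (pvCased c))) := by
        intro d
        have h1 : pre ++ c :: t = (pre ++ [c]) ++ t := by simp
        have h2 : pre.length + 1 = (pre ++ [c]).length := by simp
        have h3 : (pre ++ [c]).all pvValidB = true := by
          simp [List.all_append, hpre, hv]
        rw [h1, h2, ih (pre ++ [c]) (acc ++ [d]) h3, pv_getLast_append]
      -- the character A appends equals the character pvTitleGo emits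
      have hhead :
          (if (pre.length == 0 || (((pre ++ c :: t).getD (pre.length - 1) ' ').toNat == 32
                && !(c.toNat == 32))) = true
           then c.toUpper else c)
          = (if pvCased c then (if pvPrevB pre then c.toLower else c.toUpper) else c) := by
        rcases Bool.or_eq_true _ _ |>.mp hval with halpha | hspace
        · -- c is a lowercase letter
          have h97 : 97 ≤ c.toNat := of_decide_eq_true ((Bool.and_eq_true _ _).mp halpha).1
          have h123 : c.toNat < 123 := of_decide_eq_true ((Bool.and_eq_true _ _).mp halpha).2
          have hcased : pvCased c = true := by
            simp [pvCased]; omega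
          have hns : (c.toNat == 32) = false := by
            simp; omega
          have hlow : c.toLower = c := pv_toLower_lower c h97 h123
          rw [hcased, hlow]
          cases pre with
          | nil => simp [pvPrevB]
          | cons p ps =>
            -- prev char exists: A tests whether it is a space, B whether it is cased
            have hlen : (p :: ps).length ≠ 0 := by simp
            have hne : p :: ps ≠ [] := by simp
            obtain ⟨l, hl⟩ := List.getLast?_isSome.mpr hne |> Option.isSome_iff_exists.mp
            have hmem : l ∈ (p :: ps) := List.mem_of_getLast? hl
            have hlv : pvValidB l = true := by
              have := List.all_eq_true.mp hpre l hmem; exact this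
            have hget : ((p :: ps) ++ c :: t).getD ((p :: ps).length - 1) ' ' = l := by
              have hidx : (p :: ps).length - 1 < (p :: ps).length := by simp
              rw [List.getD_append _ _ _ _ hidx]
              have : (p :: ps).getLast hne = l := by
                rw [List.getLast_eq_iff_getLast?_eq_some]; exact hl
              rw [← this, List.getLast_eq_getElem]
              simp [List.getD]
              rfl
            rw [hget]
            have hprev : pvPrevB (p :: ps) = pvCased l := by simp [pvPrevB, hl]
            rw [hprev]
            rcases Bool.or_eq_true _ _ |>.mp hlv with hla | hls
            · -- prev is a lowercase letter: cased, not space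
              have a1 := (Bool.and_eq_true _ _).mp hla
              have l97 : 97 ≤ l.toNat := of_decide_eq_true a1.1
              have l123 : l.toNat < 123 := of_decide_eq_true a1.2
              have hc : pvCased l = true := by simp [pvCased]; omega
              have hs : (l.toNat == 32) = false := by simp; omega
              simp [hc, hs, hns]
            · -- prev is a space: not cased
              have ls : l.toNat = 32 := by simpa using hls
              have hc : pvCased l = false := by simp [pvCased]; omega
              simp [hc, ls, hns]
        · -- c is a space: both sides emit the space unchanged
          have hs : c.toNat = 32 := by simpa using hspace
          have hc : c = ' ' := pv_char_eq_of_toNat c hs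
          have hcase : pvCased c = false := by simp [pvCased, hs]
          subst hc
          rw [hcase]
          split <;> simp
      -- assemble the step
      have hne : (!pvValidB c) = false := by simp [hv]
      simp only [str_title_f_go, hval, if_true]
      rw [show pvTitleGo (c :: t) (pvPrevB pre) =
            (if pvCased c then (if pvPrevB pre then c.toLower else c.toUpper) else c)
              :: pvTitleGo t (pvCased c) from rfl]
      simp only [List.any_cons, hne, Bool.false_or]
      by_cases hcond : (pre.length == 0 || (((pre ++ c :: t).getD (pre.length - 1) ' ').toNat == 32
            && !(c.toNat == 32))) = true
      · rw [if_pos hcond, hstep c.toUpper]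
        have := hhead
        rw [if_pos hcond] at this
        rw [← this]
        split <;> simp
      · rw [if_neg hcond, hstep c]
        have := hhead
        rw [if_neg hcond] at this
        rw [← this]
        split <;> simp
    · -- invalid head: A returns the error immediately, B's `any` finds it
      have hvf : pvValidB c = false := by simpa using hv
      have hval : ((97 ≤ c.toNat && c.toNat < 123) || c.toNat == 32) = false := hvf
      simp [str_title_f_go, hval, hvf]

-- ===== VERDICT (by name: the statement is the Claim_ definition above) =====
theorem str_title_f_spec : Claim_equal_str_title_f := by
  intro s _
  unfold Spec_str_title_f str_title_f str_title_f_alt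
  have h := pv_go_eq s.toList [] [] (by simp)
  simpa [pvPrevB] using h
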